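-- pv_equiv track=rewrite | github.com/planktontoolbox/plankton-toolbox | plankton_toolbox/activities/analyse_datasets_tab8.py | primer_report_count_table_sort
-- ===== SOURCE A (Python) =====
-- def primer_report_count_table_sort(s1, s2):
--     """ """
--     # Sort order:
--     # - 0: scientific_name
--     # - 1: size_class
--     # - 2: trophic_type
--     # - 3: stage
--     # - 4: sex
--     columnsortorder = [0, 1, 2, 3, 4]
--     #
--     for index in columnsortorder:
--         s1item = s1[index]
--         s2item = s2[index]
--         # Empty strings should be at the end.
--         if (s1item != '') and (s2item == ''): return -1
--         if (s1item == '') and (s2item != ''): return 1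
--         if s1item < s2item: return -1
--         if s1item > s2item: return 1
--     #
--     return 0 # All are equal.
-- ===== SOURCE B (Python) =====
-- def primer_report_count_table_sort(s1, s2):
--     """ """
--     # Key per row over the five sort columns: (is_empty, value) puts empty strings
--     # last (False < True) and otherwise compares the raw value; one lexicographic
--     # list comparison replaces the column-by-column early-return loop.
--     k1 = [(item == '', item) for item in s1[:5]]
--     k2 = [(item == '', item) for item in s2[:5]]
--     if k1 < k2:
--         return -1
--     if k1 > k2:
--         return 1
--     return 0
-- ===== Notes on version B (the rewrite author's own statement) =====
-- stated objective: idiomatic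
-- what changed: Replaces the explicit four-branch early-return loop with indexing by building (is_empty, value) key lists from the sliced rows and doing a single lexicographic list comparison; the emptiness flag reproduces the empties-last rule.
-- crash fix: A raises IndexError when a row has fewer than 5 columns and all columns up to the shorter length compare equal; B slices s[:5] and returns the lexicographic comparison (e.g. -1 for (['a'], ['a','b'])). — e.g. on primer_report_count_table_sort(["a"], ["a", "b"]): A raises IndexError, B returns -1
import Mathlib
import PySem

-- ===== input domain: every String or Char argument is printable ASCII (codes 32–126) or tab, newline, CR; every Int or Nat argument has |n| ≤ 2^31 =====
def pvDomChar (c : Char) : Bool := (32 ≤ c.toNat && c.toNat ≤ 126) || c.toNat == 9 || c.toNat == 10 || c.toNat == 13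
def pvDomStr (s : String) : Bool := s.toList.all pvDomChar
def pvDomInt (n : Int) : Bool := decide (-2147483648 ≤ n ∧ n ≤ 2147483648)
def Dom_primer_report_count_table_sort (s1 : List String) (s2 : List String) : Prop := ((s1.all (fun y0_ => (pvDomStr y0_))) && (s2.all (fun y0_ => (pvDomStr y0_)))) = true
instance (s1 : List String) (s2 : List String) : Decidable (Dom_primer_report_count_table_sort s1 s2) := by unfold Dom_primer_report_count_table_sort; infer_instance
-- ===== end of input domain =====

-- B builds (is_empty, value) key lists from the sliced rows s[:5] and does one lexicographic
-- list comparison instead of A's four-branch early-return indexing loop (objective: idiomatic).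

-- ===== PORT A =====
-- A's loop over columnsortorder; s1[index]/s2[index] via pyGet? (none = IndexError, excluded
-- by Pre_); the early returns become the result of the recursion.
def pvALoop (cols : List Int) (s1 : List String) (s2 : List String) : Option Int :=
  match cols with
  | [] => some 0
  | index :: rest =>
    match PySem.List.pyGet? s1 index, PySem.List.pyGet? s2 index with
    | some s1item, some s2item =>
      if s1item ≠ "" ∧ s2item = "" then some (-1)
      else if s1item = "" ∧ s2item ≠ "" then some 1
      else if s1item < s2item then some (-1)
      else if s2item < s1item then some 1
      else pvALoop rest s1 s2
    | _, _ => none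

def primer_report_count_table_sort (s1 : List String) (s2 : List String) : Int :=
  (pvALoop [0, 1, 2, 3, 4] s1 s2).getD 0

-- ===== PORT B =====
-- Python tuple comparison (bool, str) < (bool, str): False < True, then string order.
def pvPairLt (p q : Bool × String) : Bool :=
  (!p.1 && q.1) || (p.1 == q.1 && decide (p.2 < q.2))

-- Python list `<`: the first differing element decides; a strict prefix is smaller.
def pvLexLt : List (Bool × String) → List (Bool × String) → Bool
  | _, [] => false
  | [], _ :: _ => true
  | p :: t1, q :: t2 => if pvPairLt p q then true else if p = q then pvLexLt t1 t2 else false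

-- [(item == '', item) for item in s[:5]]
def pvKey (s : List String) : List (Bool × String) :=
  (PySem.List.slice s none (some 5)).map (fun item => ((item == ""), item))

def primer_report_count_table_sort_alt (s1 : List String) (s2 : List String) : Int :=
  let k1 := pvKey s1
  let k2 := pvKey s2
  if pvLexLt k1 k2 then -1 else if pvLexLt k2 k1 then 1 else 0

-- ===== PRECONDITION & SPEC =====
-- A raises IndexError exactly when some row runs out before column 5 while all columns up to
-- the shorter length compare equal (otherwise an earlier column decides and A returns early).
def Pre_primer_report_count_table_sort (s1 : List String) (s2 : List String) : Prop :=
  5 ≤ min s1.length s2.length ∨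
    s1.take (min s1.length s2.length) ≠ s2.take (min s1.length s2.length)
instance (s1 : List String) (s2 : List String) : Decidable (Pre_primer_report_count_table_sort s1 s2) := by unfold Pre_primer_report_count_table_sort; infer_instance

def pvWitness_primer_report_count_table_sort : List String × List String :=
  (["a", "", "b", "c", "d"], ["a", "", "b", "c", "e"])

-- A raises IndexError when a row has fewer than 5 columns and all columns up to the shorter
-- length compare equal; B slices s[:5] and returns the lexicographic comparison there.
def Raises_primer_report_count_table_sort (s1 : List String) (s2 : List String) : Prop :=
  min s1.length s2.length < 5 ∧
    s1.take (min s1.length s2.length) = s2.take (min s1.length s2.length)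
instance (s1 : List String) (s2 : List String) : Decidable (Raises_primer_report_count_table_sort s1 s2) := by unfold Raises_primer_report_count_table_sort; infer_instance

def pvRaiseWitness_primer_report_count_table_sort : List String × List String :=
  (["a"], ["a", "b"])
def pvRaiseWitnessOut_primer_report_count_table_sort : Int := -1

def Spec_primer_report_count_table_sort (s1 : List String) (s2 : List String) (out : Int) : Prop := out = primer_report_count_table_sort_alt s1 s2
instance (s1 : List String) (s2 : List String) (out : Int) : Decidable (Spec_primer_report_count_table_sort s1 s2 out) := by unfold Spec_primer_report_count_table_sort; infer_instance

-- ===== CLAIM (what is proved, stated in full; the proofs are below) =====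
def Claim_equal_primer_report_count_table_sort : Prop := ∀ (s1 : List String) (s2 : List String), Dom_primer_report_count_table_sort s1 s2 → Pre_primer_report_count_table_sort s1 s2 → Spec_primer_report_count_table_sort s1 s2 (primer_report_count_table_sort s1 s2)
def Claim_raises_primer_report_count_table_sort : Prop := (∀ (s1 : List String) (s2 : List String), Dom_primer_report_count_table_sort s1 s2 → Raises_primer_report_count_table_sort s1 s2 → ¬ Pre_primer_report_count_table_sort s1 s2) ∧ (Dom_primer_report_count_table_sort (pvRaiseWitness_primer_report_count_table_sort.1) (pvRaiseWitness_primer_report_count_table_sort.2) ∧ Raises_primer_report_count_table_sort (pvRaiseWitness_primer_report_count_table_sort.1) (pvRaiseWitness_primer_report_count_table_sort.2) ∧ primer_report_count_table_sort_alt (pvRaiseWitness_primer_report_count_table_sort.1) (pvRaiseWitness_primer_report_count_table_sort.2) = pvRaiseWitnessOut_primer_report_count_table_sort)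

-- ===== LEMMAS AND PROOFS =====

-- B's comparison result on key lists.
def pvRes (k1 k2 : List (Bool × String)) : Int :=
  if pvLexLt k1 k2 then -1 else if pvLexLt k2 k1 then 1 else 0

-- The key list of a plain list of strings (pvKey s = pvKeyOf (s.take 5)).
def pvKeyOf (s : List String) : List (Bool × String) := s.map (fun item => ((item == ""), item))

theorem pvKey_eq_take (s : List String) : pvKey s = pvKeyOf (s.take 5) := by
  have h5 : PySem.List.slice s none (some 5) = s.take 5 := by
    simpa using PySem.List.slice_to_natCast s 5
  simp [pvKey, pvKeyOf, h5]

-- A's loop, abstracted over the remaining columns: n columns left, rows already dropped.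
def pvCmp : Nat → List String → List String → Option Int
  | 0, _, _ => some 0
  | n + 1, a :: u, b :: v =>
    if a ≠ "" ∧ b = "" then some (-1)
    else if a = "" ∧ b ≠ "" then some 1
    else if a < b then some (-1)
    else if b < a then some 1
    else pvCmp n u v
  | _ + 1, _, _ => none

def pvIdxs (k n : Nat) : List Int := (List.range' k n).map Int.ofNat

theorem pvALoop_eq_cmp (n : Nat) : ∀ (k : Nat) (s1 s2 : List String),
    pvALoop (pvIdxs k n) s1 s2 = pvCmp n (s1.drop k) (s2.drop k) := by
  induction n with
  | zero => intro k s1 s2; simp [pvIdxs, pvALoop, pvCmp]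
  | succ n ih =>
    intro k s1 s2
    have h1 : PySem.List.pyGet? s1 (Int.ofNat k) = (s1.drop k).head? := by
      simp [PySem.List.pyGet?_natCast, List.head?_drop]
    have h2 : PySem.List.pyGet? s2 (Int.ofNat k) = (s2.drop k).head? := by
      simp [PySem.List.pyGet?_natCast, List.head?_drop]
    have hidx : pvIdxs k (n + 1) = Int.ofNat k :: pvIdxs (k + 1) n := by
      simp [pvIdxs, List.range'_succ]
    rw [hidx]
    have g1 : s1[k]? = (s1.drop k).head? := List.head?_drop.symm
    have g2 : s2[k]? = (s2.drop k).head? := List.head?_drop.symm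
    cases hu : s1.drop k with
    | nil => simp [pvALoop, g1, hu, pvCmp]
    | cons a u =>
      cases hv : s2.drop k with
      | nil => simp [pvALoop, g1, g2, hu, hv, pvCmp]
      | cons b v =>
        have hu' : s1.drop (k + 1) = u := by
          rw [← List.drop_drop]; simp [hu]
        have hv' : s2.drop (k + 1) = v := by
          rw [← List.drop_drop]; simp [hv]
        simp only [pvALoop, h1, h2, hu, hv, List.head?_cons, pvCmp, ih (k + 1) s1 s2, hu', hv']

-- One column of B's lexicographic comparison matches one iteration of A's loop body.
theorem pvRes_cons (a b : String) (t1 t2 : List (Bool × String)) :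
    pvRes (((a == ""), a) :: t1) (((b == ""), b) :: t2) =
      (if a ≠ "" ∧ b = "" then (-1 : Int)
       else if a = "" ∧ b ≠ "" then 1
       else if a < b then -1
       else if b < a then 1
       else pvRes t1 t2) := by
  by_cases ha : a = "" <;> by_cases hb : b = "" <;>
    simp [pvRes, pvLexLt, pvPairLt, ha, hb]
  rcases lt_trichotomy a.toList b.toList with h | h | h
  · have hne : a ≠ b := fun heq => by subst heq; exact lt_irrefl _ h
    simp [h, hne]
  · have heq : a = b := String.toList_inj.mp h
    subst heq
    simp
  · have hne : a ≠ b := fun heq => by subst heq; exact lt_irrefl _ h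
    simp [h, asymm h, hne, hne.symm]

-- Where A's loop returns, B's key comparison returns the same value.
theorem pvCmp_res (n : Nat) : ∀ (u v : List String) (r : Int),
    pvCmp n u v = some r → pvRes (pvKeyOf (u.take n)) (pvKeyOf (v.take n)) = r := by
  induction n with
  | zero =>
    intro u v r h
    simp [pvCmp] at h
    simp [pvKeyOf, pvRes, pvLexLt, ← h]
  | succ n ih =>
    intro u v r h
    match u, v with
    | [], _ => simp [pvCmp] at h
    | _ :: _, [] => simp [pvCmp] at h
    | a :: u', b :: v' =>
      simp only [List.take_succ_cons, pvKeyOf, List.map_cons]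
      rw [show pvKeyOf = fun s => s.map (fun item => ((item == ""), item)) from rfl] at ih
      rw [pvRes_cons]
      simp only [pvCmp] at h
      split_ifs at h with h1 h2 h3 h4
      · rw [if_pos h1]; exact Option.some.inj h
      · rw [if_neg h1, if_pos h2]; exact Option.some.inj h
      · rw [if_neg h1, if_neg h2, if_pos h3]; exact Option.some.inj h
      · rw [if_neg h1, if_neg h2, if_neg h3, if_pos h4]; exact Option.some.inj h
      · rw [if_neg h1, if_neg h2, if_neg h3, if_neg h4]; exact ih u' v' r h

-- If A's loop raises (returns none), both rows ran out with all compared columns equal.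
theorem pvCmp_none (n : Nat) : ∀ (u v : List String), pvCmp n u v = none →
    min u.length v.length < n ∧
      u.take (min u.length v.length) = v.take (min u.length v.length) := by
  induction n with
  | zero => intro u v h; simp [pvCmp] at h
  | succ n ih =>
    intro u v h
    match u, v with
    | [], _ => simp
    | _ :: _, [] => simp
    | a :: u', b :: v' =>
      simp only [pvCmp] at h
      split_ifs at h with h1 h2 h3 h4
      have heq : a = b := by
        rcases lt_trichotomy a b with hlt | hlt | hlt
        · exact absurd hlt h3
        · exact hlt
        · exact absurd hlt h4
      obtain ⟨hlen, htake⟩ := ih u' v' h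
      subst heq
      refine ⟨by simp; omega, ?_⟩
      simp only [List.length_cons]
      rw [show min (u'.length + 1) (v'.length + 1) = min u'.length v'.length + 1 by omega]
      simp [htake]

-- ===== VERDICT (by name: the statement is the Claim_ definition above) =====
theorem primer_report_count_table_sort_spec : Claim_equal_primer_report_count_table_sort := by
  intro s1 s2 _ hpre
  show primer_report_count_table_sort _ _ = primer_report_count_table_sort_alt _ _
  have hA : primer_report_count_table_sort s1 s2 = (pvCmp 5 s1 s2).getD 0 := by
    show (pvALoop [0, 1, 2, 3, 4] s1 s2).getD 0 = _
    rw [show ([0, 1, 2, 3, 4] : List Int) = pvIdxs 0 5 by decide, pvALoop_eq_cmp]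
    simp
  have hB : primer_report_count_table_sort_alt s1 s2
      = pvRes (pvKeyOf (s1.take 5)) (pvKeyOf (s2.take 5)) := by
    show pvRes (pvKey s1) (pvKey s2) = _
    rw [pvKey_eq_take, pvKey_eq_take]
  rw [hA, hB]
  cases hc : pvCmp 5 s1 s2 with
  | none =>
    obtain ⟨hlen, htake⟩ := pvCmp_none 5 s1 s2 hc
    rcases hpre with h | h
    · omega
    · exact absurd htake h
  | some r =>
    simp [Option.getD_some, (pvCmp_res 5 s1 s2 r hc).symm]

theorem primer_report_count_table_sort_raises : Claim_raises_primer_report_count_table_sort := by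
  unfold Claim_raises_primer_report_count_table_sort
  constructor
  · intro s1 s2 _ ⟨h1, h2⟩ hpre
    rcases hpre with h | h
    · omega
    · exact h h2
  · refine ⟨by decide, by decide, ?_⟩
    simp [pvRaiseWitness_primer_report_count_table_sort,
      pvRaiseWitnessOut_primer_report_count_table_sort,
      primer_report_count_table_sort_alt, pvKey, pvLexLt, pvPairLt, PySem.List.slice]

-- self-check: the raise witness lies inside Raises_ (extracted from the proved raises claim)
theorem primer_report_count_table_sort_raises_witness :
    Raises_primer_report_count_table_sort
      pvRaiseWitness_primer_report_count_table_sort.1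
      pvRaiseWitness_primer_report_count_table_sort.2 := by
  have h := primer_report_count_table_sort_raises
  unfold Claim_raises_primer_report_count_table_sort at h
  exact h.2.2.1
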